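-- pv_equiv track=rewrite | github.com/kkaris/academic_repo | li-air_battery/gt_functions.py | uniqe_components
-- ===== SOURCE A (Python) =====
-- def uniqe_components(edge_list):
--     """
--
--     :param edge_list: list of pairs of chain molecules
--     :return: list of unique molecule ids (resids)
--     """
--     # Edge list comes in with entries like:
--     # [['id1', 'id2', w] ['id4', 'id9' w] ...]
--
--     # Utilize the uniqueness of the set function
--     s = set()
--
--     for p in edge_list:
--         s.add(p[0])
--         s.add(p[1])
--
--     ucl = list(s)
--     ucl.sort()
--
--     return ucl
-- ===== SOURCE B (Python) =====
-- def uniqe_components(edge_list):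
--     """
--
--     :param edge_list: list of pairs of chain molecules
--     :return: list of unique molecule ids (resids)
--     """
--     # Collect every endpoint (duplicates included), sort once, then
--     # emit each value only when it differs from the previously emitted one.
--     flat = []
--     for p in edge_list:
--         flat.append(p[0])
--         flat.append(p[1])
--     flat.sort()
--     ucl = []
--     for x in flat:
--         if not ucl or ucl[-1] != x:
--             ucl.append(x)
--     return ucl
-- ===== Notes on version B (the rewrite author's own statement) =====
-- stated objective: alternative
-- what changed: Replaces A's hash-set dedup followed by a sort with sort-then-single-pass adjacent dedup: all endpoints are flattened into one list, sorted once (duplicates included), and a linear scan emits each value only when it differs from the previous one; no set is used.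
import Mathlib
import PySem

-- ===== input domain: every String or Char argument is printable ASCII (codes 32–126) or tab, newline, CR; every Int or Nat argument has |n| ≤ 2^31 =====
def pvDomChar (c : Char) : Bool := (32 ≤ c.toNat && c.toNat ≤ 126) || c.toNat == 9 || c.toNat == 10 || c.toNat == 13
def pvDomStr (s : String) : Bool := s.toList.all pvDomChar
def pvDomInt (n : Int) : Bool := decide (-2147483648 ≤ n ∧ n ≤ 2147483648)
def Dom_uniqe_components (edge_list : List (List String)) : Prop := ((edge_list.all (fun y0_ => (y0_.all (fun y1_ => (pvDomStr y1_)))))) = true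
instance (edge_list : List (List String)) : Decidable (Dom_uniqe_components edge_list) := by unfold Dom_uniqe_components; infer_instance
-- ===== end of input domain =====

-- B replaces A's set-dedup-then-sort by flatten, sort everything, then one adjacent-dedup pass (no set); same result proved.


-- ===== PORT A =====
-- s = set(); for p in edge_list: s.add(p[0]); s.add(p[1]); ucl = list(s); ucl.sort(); return ucl
-- (list(s) is consumed only by sort with no key, so the set's iteration order cannot affect the result)
def uniqe_components (edge_list : List (List String)) : List String :=
  let s := edge_list.foldl
    (fun s p => PySem.Set.add (PySem.Set.add s (PySem.List.pyGetD p 0 "")) (PySem.List.pyGetD p 1 ""))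
    PySem.Set.empty
  PySem.List.sorted s (fun x => x) false

-- ===== PORT B =====
def uniqe_components_alt (edge_list : List (List String)) : List String :=
  let flat := edge_list.foldl
    (fun acc p => acc ++ [PySem.List.pyGetD p 0 "", PySem.List.pyGetD p 1 ""]) []
  let srt := PySem.List.sorted flat (fun x => x) false
  srt.foldl (fun ucl x => if ucl = [] ∨ ¬ (ucl.getLast? = some x) then ucl ++ [x] else ucl) []

-- ===== PRECONDITION & SPEC =====
-- Pre_ excludes exactly the inputs where A raises IndexError: an edge with fewer than two entries.
def Pre_uniqe_components (edge_list : List (List String)) : Prop :=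
  ∀ p ∈ edge_list, 2 ≤ p.length
instance (edge_list : List (List String)) : Decidable (Pre_uniqe_components edge_list) := by
  unfold Pre_uniqe_components; infer_instance

def pvWitness_uniqe_components : List (List String) := [["id1", "id2", "3"], ["id4", "id1", "1"]]

def Spec_uniqe_components (edge_list : List (List String)) (out : List String) : Prop := out = uniqe_components_alt edge_list
instance (edge_list : List (List String)) (out : List String) : Decidable (Spec_uniqe_components edge_list out) := by unfold Spec_uniqe_components; infer_instance

-- ===== CLAIM (what is proved, stated in full; the proofs are below) =====
def Claim_equal_uniqe_components : Prop := ∀ (edge_list : List (List String)), Dom_uniqe_components edge_list → Pre_uniqe_components edge_list → Spec_uniqe_components edge_list (uniqe_components edge_list)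

-- ===== LEMMAS AND PROOFS =====

-- every element of a strictly increasing list is ≤ its last element
theorem pv_le_getLast : ∀ {acc : List String}, acc.Pairwise (· < ·) → ∀ {a b : String},
    a ∈ acc → acc.getLast? = some b → a ≤ b := by
  intro acc
  induction acc with
  | nil => intro _ a b ha _; cases ha
  | cons c cs ih =>
    intro h a b ha hb
    rcases List.pairwise_cons.mp h with ⟨hc, hcs⟩
    cases cs with
    | nil =>
      have hac : a = c := by simpa using ha
      have hbc : c = b := by simpa using hb
      rw [hac, ← hbc]
    | cons d ds =>
      have hb' : (d :: ds).getLast? = some b := by simpa using hb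
      have hbmem : b ∈ d :: ds := List.mem_of_getLast? hb'
      rcases List.mem_cons.mp ha with ha | ha
      · exact le_of_lt (ha ▸ hc b hbmem)
      · exact ih hcs ha hb'

-- the dedup fold invariant: on a ≤-sorted input with a <-sorted accumulator below it,
-- the fold returns a <-sorted list whose members are exactly acc ∪ l
theorem pv_dedup_fold (l : List String) : ∀ (acc : List String),
    l.Pairwise (· ≤ ·) → acc.Pairwise (· < ·) → (∀ a ∈ acc, ∀ x ∈ l, a ≤ x) →
    (l.foldl (fun ucl x => if ucl = [] ∨ ¬ (ucl.getLast? = some x) then ucl ++ [x] else ucl) acc).Pairwise (· < ·) ∧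
    (∀ y, y ∈ l.foldl (fun ucl x => if ucl = [] ∨ ¬ (ucl.getLast? = some x) then ucl ++ [x] else ucl) acc ↔ y ∈ acc ∨ y ∈ l) := by
  induction l with
  | nil => intro acc _ hacc _; simpa using hacc
  | cons x xs ih =>
    intro acc hl hacc hcross
    rcases List.pairwise_cons.mp hl with ⟨hx, hxs⟩
    by_cases hcond : acc = [] ∨ ¬ (acc.getLast? = some x)
    · -- x is appended
      have hacc' : (acc ++ [x]).Pairwise (· < ·) := by
        rw [List.pairwise_append]
        refine ⟨hacc, List.pairwise_singleton _ _, ?_⟩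
        intro a ha b hb
        have hbx : b = x := by simpa using hb
        rw [hbx]
        have hle : a ≤ x := hcross a ha x (List.mem_cons_self)
        rcases lt_or_eq_of_le hle with hlt | heq
        · exact hlt
        · exfalso
          rcases hcond with hcond | hcond
          · rw [hcond] at ha; cases ha
          · apply hcond
            cases hlast : acc.getLast? with
            | none => rw [List.getLast?_eq_none_iff] at hlast; rw [hlast] at ha; cases ha
            | some c =>
              have hac : a ≤ c := pv_le_getLast hacc ha hlast
              have hca : c ≤ x := hcross c (List.mem_of_getLast? hlast) x (List.mem_cons_self)
              have : c = x := le_antisymm hca (heq ▸ hac)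
              rw [this]
      have hcross' : ∀ a ∈ acc ++ [x], ∀ y ∈ xs, a ≤ y := by
        intro a ha y hy
        rcases List.mem_append.mp ha with ha | ha
        · exact hcross a ha y (List.mem_cons_of_mem _ hy)
        · have : a = x := by simpa using ha
          rw [this]; exact hx y hy
      have hrec := ih (acc ++ [x]) hxs hacc' hcross'
      simp only [List.foldl_cons]
      rw [if_pos hcond]
      refine ⟨hrec.1, fun y => ?_⟩
      rw [hrec.2 y]
      simp only [List.mem_append, List.mem_cons]
      tauto
    · -- x equals the last element of acc, so it is already present
      rw [not_or, not_not] at hcond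
      have hxmem : x ∈ acc := List.mem_of_getLast? hcond.2
      have hcross' : ∀ a ∈ acc, ∀ y ∈ xs, a ≤ y :=
        fun a ha y hy => hcross a ha y (List.mem_cons_of_mem _ hy)
      have hrec := ih acc hxs hacc hcross'
      simp only [List.foldl_cons]
      rw [if_neg (by rw [not_or, not_not]; exact hcond)]
      refine ⟨hrec.1, fun y => ?_⟩
      rw [hrec.2 y]
      simp only [List.mem_cons]
      constructor
      · tauto
      · rintro (h | h | h)
        · exact Or.inl h
        · exact Or.inl (h ▸ hxmem)
        · exact Or.inr h

-- A's two set.adds per edge build exactly set(flat) for the flattened endpoint list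
theorem pv_fold_adds (el : List (List String)) : ∀ (s : List String),
    el.foldl (fun s p => PySem.Set.add (PySem.Set.add s (PySem.List.pyGetD p 0 "")) (PySem.List.pyGetD p 1 "")) s
      = (el.flatMap (fun p => [PySem.List.pyGetD p 0 "", PySem.List.pyGetD p 1 ""])).foldl PySem.Set.add s := by
  induction el with
  | nil => intro s; rfl
  | cons p ps ih => intro s; simp [List.flatMap_cons, ih]

theorem uniqe_components_eq (edge_list : List (List String)) :
    uniqe_components edge_list = uniqe_components_alt edge_list := by
  unfold uniqe_components uniqe_components_alt
  rw [PySem.List.foldl_append_eq_flatMap, pv_fold_adds]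
  set flat := edge_list.flatMap (fun p => [PySem.List.pyGetD p 0 "", PySem.List.pyGetD p 1 ""]) with hfdef
  have hset : List.foldl PySem.Set.add PySem.Set.empty flat = PySem.Set.ofList flat :=
    (PySem.Set.ofList_eq_foldl flat).symm
  rw [List.nil_append, hset]
  have hsortpw : (PySem.List.sorted flat (fun x => x) false).Pairwise (· ≤ ·) := by
    simpa using PySem.List.sorted_pairwise flat (fun x : String => x)
  have hd := pv_dedup_fold (PySem.List.sorted flat (fun x => x) false) [] hsortpw
    (List.Pairwise.nil) (by intro a ha; cases ha)
  have hmem : ∀ y, y ∈ (PySem.List.sorted flat (fun x => x) false).foldl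
      (fun ucl x => if ucl = [] ∨ ¬ (ucl.getLast? = some x) then ucl ++ [x] else ucl) [] ↔
      y ∈ PySem.Set.ofList flat := by
    intro y
    rw [hd.2 y]
    simp [PySem.List.mem_sorted, PySem.Set.mem_ofList]
  have hperm : ((PySem.List.sorted flat (fun x => x) false).foldl
      (fun ucl x => if ucl = [] ∨ ¬ (ucl.getLast? = some x) then ucl ++ [x] else ucl) []).Perm
      (PySem.Set.ofList flat) :=
    (List.perm_ext_iff_of_nodup (List.Pairwise.nodup hd.1) (PySem.Set.nodup_ofList flat)).mpr hmem
  exact PySem.List.sorted_eq_of_perm_of_pairwise_lt _ _ _ hperm hd.1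

-- ===== VERDICT (by name: the statement is the Claim_ definition above) =====
theorem uniqe_components_spec : Claim_equal_uniqe_components := by
  intro edge_list _ _
  unfold Spec_uniqe_components
  exact uniqe_components_eq edge_list
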